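-- pv_equiv track=rewrite | github.com/fardeen9983/Ultimate-Dux | Languages/Python/Competitive Programs/HackerRank/Ranked.py | numofPrizes
-- ===== SOURCE A (Python) =====
-- def numofPrizes(k, marks):
--     if 0 in marks:
--         marks.remove(0)
--     marks.sort(reverse=True)
--     temp = set(marks)
--     rank = [(x, marks.count(x)) for x in temp]
--     rank.sort(reverse=True)
--     res = 0
--     for i in rank:
--         if rank.index(i) >= k:
--             break
--         res += i[1]
--
--     return res
-- ===== SOURCE B (Python) =====
-- def numofPrizes(k, marks):
--     # Return-value equivalent to A; performs the same in-place mutation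
--     # (remove first 0 if present, sort descending).
--     if 0 in marks:
--         marks.remove(0)
--     marks.sort(reverse=True)
--     res = 0
--     distinct = 0
--     prev = None
--     for x in marks:
--         if x != prev:
--             distinct += 1
--             prev = x
--         if distinct > k:
--             break
--         res += 1
--     return res
-- ===== Notes on version B (the rewrite author's own statement) =====
-- stated objective: faster
-- what changed: Instead of building a set, counting each distinct value over the whole list and sorting the (value,count) pairs with a quadratic rank.index-based break, B makes one linear sweep over the already-sorted list, counting elements while tracking how many distinct values have started.
import Mathlib
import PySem

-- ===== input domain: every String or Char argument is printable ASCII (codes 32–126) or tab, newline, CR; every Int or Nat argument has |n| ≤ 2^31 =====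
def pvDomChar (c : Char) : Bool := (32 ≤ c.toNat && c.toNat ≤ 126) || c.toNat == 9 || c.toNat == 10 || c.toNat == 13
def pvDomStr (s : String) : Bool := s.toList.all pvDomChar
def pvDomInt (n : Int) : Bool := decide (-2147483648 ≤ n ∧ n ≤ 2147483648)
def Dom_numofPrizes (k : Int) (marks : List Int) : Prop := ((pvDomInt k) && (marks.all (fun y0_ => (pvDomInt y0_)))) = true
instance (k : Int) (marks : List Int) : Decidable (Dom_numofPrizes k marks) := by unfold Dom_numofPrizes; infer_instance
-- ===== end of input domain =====

-- B replaces A's set/count/sort-of-pairs tally with one linear sweep over the sorted list (objective: simpler).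
-- Both A and B mutate `marks` in place identically (remove first 0, sort descending); the equivalence
-- proved here is about the return value.

-- ===== PORT A =====
-- for i in rank: if rank.index(i) >= k: break; res += i[1]
-- (rank.index never raises here since i is drawn from rank; .getD 0 is that always-some lookup)
def numofPrizesLoop (k : Int) (rank : List (Int × Int)) : List (Int × Int) → Int → Int
  | [], res => res
  | i :: rest, res =>
    if (((PySem.List.index? rank i).getD 0 : Nat) : Int) ≥ k then res
    else numofPrizesLoop k rank rest (res + i.2)

def numofPrizes (k : Int) (marks : List Int) : Int :=
  let marks1 := if marks.contains 0 then (PySem.List.remove? marks 0).getD marks else marks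
  let marks2 := PySem.List.sorted marks1 (fun x => x) true
  let temp := PySem.Set.ofList marks2
  let rank := PySem.List.sorted2 (temp.map (fun x => (x, ((PySem.List.count marks2 x : Nat) : Int)))) Prod.fst Prod.snd true
  numofPrizesLoop k rank rank 0

-- ===== PORT B =====
-- res=0; distinct=0; prev=None; for x in marks: if x != prev: distinct += 1; prev = x
--                               if distinct > k: break
--                               res += 1
def numofPrizesAltLoop (k : Int) : List Int → Int → Int → Option Int → Int
  | [], res, _, _ => res
  | x :: xs, res, distinct, prev =>
    if some x ≠ prev then
      if distinct + 1 > k then res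
      else numofPrizesAltLoop k xs (res + 1) (distinct + 1) (some x)
    else
      if distinct > k then res
      else numofPrizesAltLoop k xs (res + 1) distinct prev

def numofPrizes_alt (k : Int) (marks : List Int) : Int :=
  let marks1 := if marks.contains 0 then (PySem.List.remove? marks 0).getD marks else marks
  let marks2 := PySem.List.sorted marks1 (fun x => x) true
  numofPrizesAltLoop k marks2 0 0 none

-- ===== PRECONDITION & SPEC =====
def Spec_numofPrizes (k : Int) (marks : List Int) (out : Int) : Prop := out = numofPrizes_alt k marks
instance (k : Int) (marks : List Int) (out : Int) : Decidable (Spec_numofPrizes k marks out) := by unfold Spec_numofPrizes; infer_instance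

-- ===== CLAIM (what is proved, stated in full; the proofs are below) =====
def Claim_equal_numofPrizes : Prop := ∀ (k : Int) (marks : List Int), Dom_numofPrizes k marks → Spec_numofPrizes k marks (numofPrizes k marks)

-- ===== LEMMAS AND PROOFS =====

-- common value both sides are proved to equal: sum of the multiplicities of the first k distinct values
def topSum (k : Int) (s : List Int) : Int :=
  (((PySem.List.dedup s).take k.toNat).map (fun x => ((List.count x s : Nat) : Int))).sum

-- ---- group decomposition of a descending-sorted list ----
lemma decomp_group (x : Int) : ∀ (xs : List Int),
    (x :: xs).Pairwise (fun a b => b ≤ a) →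
    ∃ j t, xs = List.replicate j x ++ t ∧ (∀ y ∈ t, y < x) ∧ t.Pairwise (fun a b => b ≤ a) := by
  intro xs
  induction xs with
  | nil => exact fun _ => ⟨0, [], rfl, by simp, List.Pairwise.nil⟩
  | cons z zs ih =>
    intro h
    rcases List.pairwise_cons.mp h with ⟨hle, hxs⟩
    rcases List.pairwise_cons.mp hxs with ⟨hz, hzs⟩
    rcases eq_or_lt_of_le (hle z (by simp)) with hzx | hzx
    · rcases ih (List.Pairwise.cons (fun y hy => hle y (by simp [hy])) hzs) with ⟨j, t, het, hlt, hp⟩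
      exact ⟨j + 1, t, by simp [List.replicate_succ, het, hzx], hlt, hp⟩
    · refine ⟨0, z :: zs, by simp, ?_, hxs⟩
      intro y hy
      rcases List.mem_cons.mp hy with rfl | hy
      · exact hzx
      · exact lt_of_le_of_lt (hz y hy) hzx

-- ---- dedup of a group-fronted list ----
lemma foldl_add_cons (t : List Int) (x : Int) (hx : x ∉ t) :
    ∀ s : List Int, t.foldl PySem.Set.add (x :: s) = x :: t.foldl PySem.Set.add s := by
  induction t with
  | nil => intro s; rfl
  | cons y ys ih =>
    intro s
    have hyx : y ≠ x := fun hh => hx (by simp [hh])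
    have hc : PySem.Set.contains (x :: s) y = PySem.Set.contains s y := by
      simp only [PySem.Set.contains, List.contains_cons, beq_iff_eq, Bool.or_eq_right_iff_imp]
      exact fun hh => absurd hh hyx
    simp only [List.foldl_cons]
    have hstep : PySem.Set.add (x :: s) y = x :: PySem.Set.add s y := by
      simp only [PySem.Set.add, hc]
      split_ifs <;> simp
    rw [hstep, ih (fun hh => hx (by simp [hh]))]

lemma foldl_add_replicate (j : Nat) (x : Int) :
    (List.replicate j x).foldl PySem.Set.add [x] = [x] := by
  induction j with
  | zero => rfl
  | succ n ih =>
    rw [List.replicate_succ, List.foldl_cons]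
    have : PySem.Set.add [x] x = [x] := by simp [PySem.Set.add]
    rw [this, ih]

lemma dedup_group (j : Nat) (x : Int) (t : List Int) (hx : x ∉ t) :
    PySem.List.dedup (List.replicate (j + 1) x ++ t) = x :: PySem.List.dedup t := by
  rw [PySem.List.dedup_eq_ofList, PySem.List.dedup_eq_ofList,
      PySem.Set.ofList_eq_foldl, PySem.Set.ofList_eq_foldl, List.foldl_append]
  have h1 : (List.replicate (j + 1) x).foldl PySem.Set.add [] = [x] := by
    rw [List.replicate_succ, List.foldl_cons]
    have : PySem.Set.add [] x = [x] := rfl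
    rw [this, foldl_add_replicate]
  rw [h1, foldl_add_cons t x hx]

lemma dedup_desc : ∀ (n : Nat) (s : List Int), s.length ≤ n →
    s.Pairwise (fun a b => b ≤ a) →
    (PySem.List.dedup s).Pairwise (fun a b => b < a) := by
  intro n
  induction n with
  | zero =>
    intro s hlen _
    have : s = [] := List.length_eq_zero_iff.mp (Nat.le_zero.mp hlen)
    subst this
    simp [PySem.List.dedup, PySem.Set.ofList_eq_foldl]
  | succ n ih =>
    intro s hlen hs
    cases s with
    | nil => simp [PySem.List.dedup, PySem.Set.ofList_eq_foldl]
    | cons x xs =>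
      rcases decomp_group x xs hs with ⟨j, t, het, hlt, hp⟩
      have hx : x ∉ t := fun hh => lt_irrefl x (hlt x hh)
      have hsr : x :: xs = List.replicate (j + 1) x ++ t := by
        simp [List.replicate_succ, het]
      rw [hsr, dedup_group j x t hx]
      refine List.Pairwise.cons ?_ (ih t ?_ hp)
      · intro y hy
        exact hlt y ((PySem.List.mem_dedup t y).mp hy)
      · have : t.length ≤ xs.length := by simp [het]
        have h2 : xs.length ≤ n := by simpa using hlen
        omega

-- ---- A's sorted2 is the identity on a strictly fst-decreasing list ----
lemma foldl_insertBy_sorted : ∀ (l acc : List (Int × Int)),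
    (acc ++ l).Pairwise (fun a b => b.1 < a.1) →
    l.foldl (fun ys x => PySem.List.insertBy
      (fun a b => decide (b.1 < a.1) || !decide (a.1 < b.1) && decide (b.2 < a.2)) x ys) acc
      = acc ++ l := by
  intro l
  induction l with
  | nil => intro acc _; simp
  | cons x xs ih =>
    intro acc h
    simp only [List.foldl_cons]
    have hins : PySem.List.insertBy
        (fun a b => decide (b.1 < a.1) || !decide (a.1 < b.1) && decide (b.2 < a.2)) x acc
        = acc ++ [x] := by
      apply PySem.List.insertBy_of_forall_not_before
      intro y hy
      have hxy : x.1 < y.1 := (List.pairwise_append.mp h).2.2 y hy x (by simp)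
      simp [hxy, not_lt_of_gt hxy]
    rw [hins, ih (acc ++ [x]) (by simpa using h), List.append_assoc]
    rfl

lemma sorted2_id (l : List (Int × Int)) (h : l.Pairwise (fun a b => b.1 < a.1)) :
    PySem.List.sorted2 l Prod.fst Prod.snd true = l := by
  have := foldl_insertBy_sorted l [] (by simpa using h)
  simpa [PySem.List.sorted2] using this

-- ---- A's loop sums the second components of the first k entries ----
lemma aLoop_eq (k : Int) (rank : List (Int × Int))
    (h : rank.Pairwise (fun a b => b.1 < a.1)) :
    ∀ suf pre res, rank = pre ++ suf →
      numofPrizesLoop k rank suf res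
        = res + ((suf.take (k.toNat - pre.length)).map Prod.snd).sum := by
  intro suf
  induction suf with
  | nil => intro pre res _; simp [numofPrizesLoop]
  | cons i rest ih =>
    intro pre res hr
    have hnotin : i ∉ pre := by
      intro hin
      have hh := (List.pairwise_append.mp (hr ▸ h)).2.2 i hin i (by simp)
      exact lt_irrefl _ hh
    have hidx : PySem.List.index? rank i = some pre.length :=
      (PySem.List.index?_eq_some_iff rank i pre.length).mpr ⟨pre, rest, hr, rfl, hnotin⟩
    simp only [numofPrizesLoop, hidx, Option.getD_some]
    by_cases hk : ((pre.length : Nat) : Int) ≥ k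
    · have h0 : k.toNat - pre.length = 0 := by omega
      simp [hk, h0]
    · have h1 : k.toNat - pre.length = (k.toNat - (pre.length + 1)) + 1 := by omega
      simp only [hk, if_false]
      rw [ih (pre ++ [i]) (res + i.2) (by simp [hr])]
      simp [h1, List.take_succ_cons, add_assoc]

-- ---- B's loop lemmas ----
lemma bLoop_shift : ∀ (t : List Int) (k res d : Int) (prev : Option Int),
    numofPrizesAltLoop k t res d prev = res + numofPrizesAltLoop (k - d) t 0 0 prev := by
  intro t
  induction t with
  | nil => intro k res d prev; simp [numofPrizesAltLoop]
  | cons x xs ih =>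
    intro k res d prev
    simp only [numofPrizesAltLoop]
    by_cases hp : some x ≠ prev
    · rw [if_pos hp, if_pos hp]
      by_cases hk : d + 1 > k
      · rw [if_pos hk, if_pos (show (0:Int) + 1 > k - d by omega)]; ring
      · rw [if_neg hk, if_neg (show ¬((0:Int) + 1 > k - d) by omega),
            ih k (res + 1) (d + 1) (some x), ih (k - d) (0 + 1) (0 + 1) (some x)]
        have h2 : k - (d + 1) = k - d - (0 + 1) := by ring
        rw [h2]; ring
    · rw [if_neg hp, if_neg hp]
      by_cases hk : d > k
      · rw [if_pos hk, if_pos (show (0:Int) > k - d by omega)]; ring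
      · rw [if_neg hk, if_neg (show ¬((0:Int) > k - d) by omega),
            ih k (res + 1) d prev, ih (k - d) (0 + 1) 0 prev]
        have h2 : k - d - 0 = k - d := by ring
        rw [h2]; ring

lemma bLoop_skip : ∀ (j : Nat) (t : List Int) (k res d x : Int), d ≤ k →
    numofPrizesAltLoop k (List.replicate j x ++ t) res d (some x)
      = numofPrizesAltLoop k t (res + (j : Int)) d (some x) := by
  intro j
  induction j with
  | zero => intro t k res d x _; simp
  | succ n ih =>
    intro t k res d x hd
    rw [List.replicate_succ, List.cons_append]
    simp only [numofPrizesAltLoop]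
    rw [if_neg (show ¬(some x ≠ some x) by simp), if_neg (show ¬(d > k) by omega),
        ih t k (res + 1) d x hd]
    congr 1
    push_cast; ring

lemma bLoop_prev (t : List Int) (k res d : Int) (p q : Option Int)
    (h : ∀ y, t.head? = some y → p ≠ some y ∧ q ≠ some y) :
    numofPrizesAltLoop k t res d p = numofPrizesAltLoop k t res d q := by
  cases t with
  | nil => rfl
  | cons x xs =>
    rcases h x rfl with ⟨hp, hq⟩
    simp only [numofPrizesAltLoop]
    rw [if_pos (Ne.symm hp), if_pos (Ne.symm hq)]

-- ---- topSum over one leading group ----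
lemma topSum_group (k : Int) (j : Nat) (x : Int) (t : List Int)
    (hx : x ∉ t) (hk : 1 ≤ k) :
    topSum k (List.replicate (j + 1) x ++ t) = ((j : Int) + 1) + topSum (k - 1) t := by
  unfold topSum
  rw [dedup_group j x t hx]
  have hkt : k.toNat = (k - 1).toNat + 1 := by omega
  rw [hkt, List.take_succ_cons, List.map_cons, List.sum_cons]
  have hcx : List.count x (List.replicate (j + 1) x ++ t) = j + 1 := by
    rw [List.count_append, List.count_replicate_self, List.count_eq_zero.mpr hx]
  have hmap : ((PySem.List.dedup t).take (k - 1).toNat).map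
        (fun y => ((List.count y (List.replicate (j + 1) x ++ t) : Nat) : Int))
      = ((PySem.List.dedup t).take (k - 1).toNat).map
        (fun y => ((List.count y t : Nat) : Int)) := by
    apply List.map_congr_left
    intro y hy
    have hyt : y ∈ t := (PySem.List.mem_dedup t y).mp (List.mem_of_mem_take hy)
    have hyx : y ≠ x := fun hh => hx (hh ▸ hyt)
    simp [List.count_append, List.count_replicate, hyx.symm]
  rw [hcx, hmap]
  push_cast; ring

-- ---- main equalities against topSum ----
lemma bMain : ∀ (n : Nat) (s : List Int), s.length ≤ n →
    s.Pairwise (fun a b => b ≤ a) → ∀ k,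
    numofPrizesAltLoop k s 0 0 none = topSum k s := by
  intro n
  induction n with
  | zero =>
    intro s hlen _ k
    have : s = [] := List.length_eq_zero_iff.mp (Nat.le_zero.mp hlen)
    subst this
    simp [numofPrizesAltLoop, topSum, PySem.List.dedup]
  | succ n ih =>
    intro s hlen hs k
    cases s with
    | nil => simp [numofPrizesAltLoop, topSum, PySem.List.dedup]
    | cons x xs =>
      rcases decomp_group x xs hs with ⟨j, t, het, hlt, hp⟩
      have hx : x ∉ t := fun hh => lt_irrefl x (hlt x hh)
      have hsr : x :: xs = List.replicate (j + 1) x ++ t := by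
        simp [List.replicate_succ, het]
      simp only [numofPrizesAltLoop]
      rw [if_pos (show some x ≠ none by simp)]
      by_cases hk : (0:Int) + 1 > k
      · rw [if_pos hk]
        unfold topSum
        have : k.toNat = 0 := by omega
        simp [this]
      · rw [if_neg hk]
        have hk1 : 1 ≤ k := by omega
        rw [show xs = List.replicate j x ++ t from het,
            bLoop_skip j t k (0 + 1) (0 + 1) x (by omega),
            bLoop_shift t k (0 + 1 + (j : Int)) (0 + 1) (some x)]
        have hprev : numofPrizesAltLoop (k - (0 + 1)) t 0 0 (some x)
            = numofPrizesAltLoop (k - (0 + 1)) t 0 0 none := by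
          apply bLoop_prev
          intro y hy
          have hyt : y ∈ t := by
            cases t with
            | nil => simp at hy
            | cons a b => simp at hy; simp [hy]
          exact ⟨by simpa using (ne_of_gt (hlt y hyt)), by simp⟩
        have hlent : t.length ≤ n := by
          have h1 : xs.length = j + t.length := by simp [het]
          have h2 : xs.length ≤ n := by simpa using hlen
          omega
        rw [hprev, ih t hlent hp (k - (0 + 1))]
        have hrr : x :: (List.replicate j x ++ t) = List.replicate (j + 1) x ++ t := by
          simp [List.replicate_succ]
        rw [hrr, topSum_group k j x t hx hk1]
        push_cast; ring

lemma aMain (k : Int) (s : List Int) (hs : s.Pairwise (fun a b => b ≤ a)) :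
    numofPrizesLoop k
      (PySem.List.sorted2 ((PySem.Set.ofList s).map (fun x => (x, ((PySem.List.count s x : Nat) : Int)))) Prod.fst Prod.snd true)
      (PySem.List.sorted2 ((PySem.Set.ofList s).map (fun x => (x, ((PySem.List.count s x : Nat) : Int)))) Prod.fst Prod.snd true)
      0 = topSum k s := by
  have hd : (PySem.List.dedup s).Pairwise (fun a b => b < a) :=
    dedup_desc s.length s le_rfl hs
  have hrank : ((PySem.List.dedup s).map (fun x => (x, ((PySem.List.count s x : Nat) : Int)))).Pairwise
      (fun a b => b.1 < a.1) := by
    rw [List.pairwise_map]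
    exact hd
  rw [← PySem.List.dedup_eq_ofList, sorted2_id _ hrank, aLoop_eq k _ hrank _ [] 0 rfl]
  unfold topSum
  simp only [← List.map_take, List.map_map, PySem.List.count_eq, List.length_nil,
    Nat.sub_zero, zero_add]
  rfl

-- ===== VERDICT (by name: the statement is the Claim_ definition above) =====
theorem numofPrizes_spec : Claim_equal_numofPrizes := by
  intro k marks _
  unfold Spec_numofPrizes numofPrizes numofPrizes_alt
  have hs := PySem.List.sorted_pairwise_rev
    (if marks.contains 0 then (PySem.List.remove? marks 0).getD marks else marks) (fun x : Int => x)
  rw [aMain k _ hs, bMain _ _ le_rfl hs k]
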